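-- pv_equiv track=rewrite | github.com/adespinosa14/right-click-test | PythonApproach/category_parser.py | Category_Parser
-- ===== SOURCE A (Python) =====
-- def Category_Parser(category:str):
--
--     types = category.replace(' + ', ',').replace(' - ', ',').split(',')
--     all_types = []
--
--     for type in types:
--         if 'Air Conditioner' in type or 'AC' in type:
--             all_types.append('Air Conditioner')
--             continue
--
--         if 'Heat Pump' in type:
--             all_types.append('Heat Pump')
--             continue
--
--         if 'Furnace' in type:
--             all_types.append('Furnace')
--             continue
--
--         if 'Mini-Split' in type:
--             all_types.append('Mini-Split')
--             continue
--
--         if 'Air Handler' in type: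
--             all_types.append('Air Handler')
--             continue
--
--         if 'Rooftop Unit' in type:
--             all_types.append('Rooftop Unit')
--             continue
--
--         if 'Compressor' in type:
--             all_types.append('Compressor')
--             continue
--
--         if 'Motor' in type:
--             all_types.append('Motor')
--             continue
--
--         if 'Coil' in type:
--             all_types.append('Coil')
--             continue
--
--         if 'Thermostat' in type:
--             all_types.append('Thermostat')
--             continue
--
--         if 'Capacitor' in type:
--             all_types.append('Capacitor')
--             continue
--
--         if 'Gas Valve' in type:
--             all_types.append('Gas Valve')
--             continue
--
--         if 'Control Board' in type:
--             all_types.append('Control Board')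
--             continue
--
--         if 'Ignitor' in type:
--             all_types.append('Ignitor')
--             continue
--
--         if 'Humidifier' in type:
--             all_types.append('Humidifier')
--             continue
--
--         if 'Air Cleaner' in type:
--             all_types.append('Air Cleaner')
--             continue
--
--         if 'Air Purifier' in type:
--             all_types.append('Air Purifier')
--             continue
--
--     return all_types
-- ===== SOURCE B (Python) =====
-- # Staged passes with loop inversion: instead of A's per-token 17-branch chain,
-- # make one pass per table row over ALL tokens, filling a per-token slot with
-- # the first (highest-priority) label that matches; then drop unmatched slots.
-- _TABLE = [
--     (('Air Conditioner', 'AC'), 'Air Conditioner'),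
--     (('Heat Pump',), 'Heat Pump'),
--     (('Furnace',), 'Furnace'),
--     (('Mini-Split',), 'Mini-Split'),
--     (('Air Handler',), 'Air Handler'),
--     (('Rooftop Unit',), 'Rooftop Unit'),
--     (('Compressor',), 'Compressor'),
--     (('Motor',), 'Motor'),
--     (('Coil',), 'Coil'),
--     (('Thermostat',), 'Thermostat'),
--     (('Capacitor',), 'Capacitor'),
--     (('Gas Valve',), 'Gas Valve'),
--     (('Control Board',), 'Control Board'),
--     (('Ignitor',), 'Ignitor'),
--     (('Humidifier',), 'Humidifier'),
--     (('Air Cleaner',), 'Air Cleaner'),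
--     (('Air Purifier',), 'Air Purifier'),
-- ]
--
-- def Category_Parser(category: str):
--     tokens = category.replace(' + ', ',').replace(' - ', ',').split(',')
--     best = [None] * len(tokens)
--     for patterns, label in _TABLE:
--         best = [label if b is None and any(p in t for p in patterns) else b
--                 for b, t in zip(best, tokens)]
--     return [b for b in best if b is not None]
-- ===== Notes on version B (the rewrite author's own statement) =====
-- stated objective: alternative
-- what changed: Inverted the loops: instead of scanning the 17 branches per token, B makes one pass per (patterns,label) table row over all tokens, filling a per-token slot with the first-priority matching label, then filters out unmatched slots.
import Mathlib
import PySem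

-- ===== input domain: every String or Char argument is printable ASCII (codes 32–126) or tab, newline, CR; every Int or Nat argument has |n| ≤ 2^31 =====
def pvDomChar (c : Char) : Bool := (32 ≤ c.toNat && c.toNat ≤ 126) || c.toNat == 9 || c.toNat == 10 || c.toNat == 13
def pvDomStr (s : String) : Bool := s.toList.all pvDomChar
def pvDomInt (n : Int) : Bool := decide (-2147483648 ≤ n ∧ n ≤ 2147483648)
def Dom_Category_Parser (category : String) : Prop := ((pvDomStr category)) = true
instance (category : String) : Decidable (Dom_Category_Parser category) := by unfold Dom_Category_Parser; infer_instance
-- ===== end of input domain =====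

-- B inverts the loops: one pass per (patterns,label) table row over all tokens,
-- filling per-token slots in priority order, instead of A's per-token branch chain.
-- ===== PORT A =====
-- literal transliteration: for-loop with if/append/continue chain, in A's order
def Category_Parser (category : String) : List String :=
  -- split? is always `some` here since the separator "," is nonempty; .getD [] unwraps it
  ((PySem.Str.split? (PySem.Str.replace (PySem.Str.replace category " + " ",") " - " ",") ",").getD []).foldl
    (fun acc type =>
      if PySem.Str.isIn "Air Conditioner" type || PySem.Str.isIn "AC" type then acc ++ ["Air Conditioner"]
      else if PySem.Str.isIn "Heat Pump" type then acc ++ ["Heat Pump"]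
      else if PySem.Str.isIn "Furnace" type then acc ++ ["Furnace"]
      else if PySem.Str.isIn "Mini-Split" type then acc ++ ["Mini-Split"]
      else if PySem.Str.isIn "Air Handler" type then acc ++ ["Air Handler"]
      else if PySem.Str.isIn "Rooftop Unit" type then acc ++ ["Rooftop Unit"]
      else if PySem.Str.isIn "Compressor" type then acc ++ ["Compressor"]
      else if PySem.Str.isIn "Motor" type then acc ++ ["Motor"]
      else if PySem.Str.isIn "Coil" type then acc ++ ["Coil"]
      else if PySem.Str.isIn "Thermostat" type then acc ++ ["Thermostat"]
      else if PySem.Str.isIn "Capacitor" type then acc ++ ["Capacitor"]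
      else if PySem.Str.isIn "Gas Valve" type then acc ++ ["Gas Valve"]
      else if PySem.Str.isIn "Control Board" type then acc ++ ["Control Board"]
      else if PySem.Str.isIn "Ignitor" type then acc ++ ["Ignitor"]
      else if PySem.Str.isIn "Humidifier" type then acc ++ ["Humidifier"]
      else if PySem.Str.isIn "Air Cleaner" type then acc ++ ["Air Cleaner"]
      else if PySem.Str.isIn "Air Purifier" type then acc ++ ["Air Purifier"]
      else acc)
    []

-- ===== PORT B =====
-- priority-ordered (patterns, label) table, as in Source B
def pvCatTable : List (List String × String) :=
[
  (["Air Conditioner", "AC"], "Air Conditioner"),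
  (["Heat Pump"], "Heat Pump"),
  (["Furnace"], "Furnace"),
  (["Mini-Split"], "Mini-Split"),
  (["Air Handler"], "Air Handler"),
  (["Rooftop Unit"], "Rooftop Unit"),
  (["Compressor"], "Compressor"),
  (["Motor"], "Motor"),
  (["Coil"], "Coil"),
  (["Thermostat"], "Thermostat"),
  (["Capacitor"], "Capacitor"),
  (["Gas Valve"], "Gas Valve"),
  (["Control Board"], "Control Board"),
  (["Ignitor"], "Ignitor"),
  (["Humidifier"], "Humidifier"),
  (["Air Cleaner"], "Air Cleaner"),
  (["Air Purifier"], "Air Purifier")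
]

-- one staged pass of Source B: the list comprehension over zip(best, tokens)
def pvStage (patterns : List String) (label : String) (best : List (Option String)) (toks : List String) : List (Option String) :=
  List.zipWith (fun b t => if b.isNone && patterns.any (fun p => PySem.Str.isIn p t) then some label else b) best toks

def Category_Parser_alt (category : String) : List String :=
  let toks := (PySem.Str.split? (PySem.Str.replace (PySem.Str.replace category " + " ",") " - " ",") ",").getD []
  (pvCatTable.foldl (fun best e => pvStage e.1 e.2 best toks) (toks.map (fun _ => none))).filterMap id

-- ===== PRECONDITION & SPEC =====
def Spec_Category_Parser (category : String) (out : List String) : Prop := out = Category_Parser_alt category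
instance (category : String) (out : List String) : Decidable (Spec_Category_Parser category out) := by unfold Spec_Category_Parser; infer_instance

-- ===== CLAIM (what is proved, stated in full; the proofs are below) =====
def Claim_equal_Category_Parser : Prop := ∀ (category : String), Dom_Category_Parser category → Spec_Category_Parser category (Category_Parser category)

-- ===== LEMMAS AND PROOFS =====

-- first table row with a matching pattern (what one token classifies to)
def pvClassify (t : String) : Option String :=
  pvCatTable.findSome? (fun e => if e.1.any (fun p => PySem.Str.isIn p t) then some e.2 else none)

-- evolution of one token's slot across the rows of a table prefix
def pvTok (T : List (List String × String)) (b : Option String) (t : String) : Option String :=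
  T.foldl (fun b e => if b.isNone && e.1.any (fun p => PySem.Str.isIn p t) then some e.2 else b) b

theorem pv_zip_comp {α β γ δ : Type} (f : γ → β → δ) (g : α → β → γ) (l1 : List α) (l2 : List β) :
    List.zipWith f (List.zipWith g l1 l2) l2 = List.zipWith (fun a b => f (g a b) b) l1 l2 := by
  induction l1 generalizing l2 with
  | nil => simp
  | cons a l ih => cases l2 <;> simp [ih]

theorem pv_zip_fst {α β : Type} (l1 : List α) (l2 : List β) (h : l1.length = l2.length) :
    List.zipWith (fun a _ => a) l1 l2 = l1 := by
  induction l1 generalizing l2 with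
  | nil => simp
  | cons a l ih => cases l2 with
    | nil => simp at h
    | cons b l2 => simp at h; simp [ih l2 h]

-- the outer fold over table rows acts pointwise on each token slot
theorem pvFoldStage (T : List (List String × String)) (toks : List String)
    (best : List (Option String)) (h : best.length = toks.length) :
    T.foldl (fun b e => pvStage e.1 e.2 b toks) best = List.zipWith (pvTok T) best toks := by
  induction T generalizing best with
  | nil =>
    simp only [List.foldl_nil]
    exact (pv_zip_fst best toks h).symm
  | cons e T ih =>
    rw [List.foldl_cons]
    have hlen : (pvStage e.1 e.2 best toks).length = toks.length := by
      simp [pvStage, h]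
    rw [ih _ hlen]
    simp only [pvStage, pv_zip_comp]
    rfl

theorem pv_zip_map_const {α β : Type} (f : Option β → α → Option β) (toks : List α) :
    List.zipWith f (toks.map (fun _ => (none : Option β))) toks = toks.map (fun t => f none t) := by
  induction toks with
  | nil => rfl
  | cons t toks ih => simp only [List.map_cons, List.zipWith_cons_cons, ih]

-- a filled slot never changes
theorem pv_foldl_some {α β : Type} (p : α → Bool) (g : α → β) (T : List α) (v : β) :
    T.foldl (fun (b : Option β) e => if b.isNone && p e then some (g e) else b) (some v) = some v := by
  induction T with
  | nil => rfl
  | cons e T ih => simpa using ih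

-- from a blank slot, the staged evolution is exactly first-match over the table
theorem pv_foldl_first {α β : Type} (p : α → Bool) (g : α → β) (T : List α) :
    T.foldl (fun (b : Option β) e => if b.isNone && p e then some (g e) else b) none
      = T.findSome? (fun e => if p e then some (g e) else none) := by
  induction T with
  | nil => rfl
  | cons e T ih =>
    rw [List.foldl_cons, List.findSome?_cons]
    cases hp : p e with
    | false => simpa [hp] using ih
    | true => exact pv_foldl_some p g T (g e)

theorem pvFindSome_if_cons {α β : Type} (p : α → Bool) (g : α → β) (a : α) (l : List α) :
    ((a :: l).findSome? (fun e => if p e then some (g e) else none)) =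
    (if p a then some (g a) else l.findSome? (fun e => if p e then some (g e) else none)) := by
  rw [List.findSome?_cons]; by_cases h : p a = true <;> simp [h]

set_option maxHeartbeats 1000000 in
theorem pvStep_eq (acc : List String) (t : String) :
    (if PySem.Str.isIn "Air Conditioner" t || PySem.Str.isIn "AC" t then acc ++ ["Air Conditioner"]
     else if PySem.Str.isIn "Heat Pump" t then acc ++ ["Heat Pump"]
     else if PySem.Str.isIn "Furnace" t then acc ++ ["Furnace"]
     else if PySem.Str.isIn "Mini-Split" t then acc ++ ["Mini-Split"]
     else if PySem.Str.isIn "Air Handler" t then acc ++ ["Air Handler"]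
     else if PySem.Str.isIn "Rooftop Unit" t then acc ++ ["Rooftop Unit"]
     else if PySem.Str.isIn "Compressor" t then acc ++ ["Compressor"]
     else if PySem.Str.isIn "Motor" t then acc ++ ["Motor"]
     else if PySem.Str.isIn "Coil" t then acc ++ ["Coil"]
     else if PySem.Str.isIn "Thermostat" t then acc ++ ["Thermostat"]
     else if PySem.Str.isIn "Capacitor" t then acc ++ ["Capacitor"]
     else if PySem.Str.isIn "Gas Valve" t then acc ++ ["Gas Valve"]
     else if PySem.Str.isIn "Control Board" t then acc ++ ["Control Board"]
     else if PySem.Str.isIn "Ignitor" t then acc ++ ["Ignitor"]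
     else if PySem.Str.isIn "Humidifier" t then acc ++ ["Humidifier"]
     else if PySem.Str.isIn "Air Cleaner" t then acc ++ ["Air Cleaner"]
     else if PySem.Str.isIn "Air Purifier" t then acc ++ ["Air Purifier"]
     else acc)
    = acc ++ (pvClassify t).toList := by
  simp only [pvClassify, pvCatTable,
    pvFindSome_if_cons (fun e : List String × String => e.1.any (fun p => PySem.Str.isIn p t))
      (fun e : List String × String => e.2),
    List.findSome?_nil, List.any_cons, List.any_nil, Bool.or_false]
  by_cases h0 : (PySem.Str.isIn "Air Conditioner" t || PySem.Str.isIn "AC" t) = true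
  · rw [if_pos h0, if_pos h0]; rfl
  · rw [if_neg h0, if_neg h0]
    by_cases h1 : PySem.Str.isIn "Heat Pump" t = true
    · rw [if_pos h1, if_pos h1]; rfl
    · rw [if_neg h1, if_neg h1]
      by_cases h2 : PySem.Str.isIn "Furnace" t = true
      · rw [if_pos h2, if_pos h2]; rfl
      · rw [if_neg h2, if_neg h2]
        by_cases h3 : PySem.Str.isIn "Mini-Split" t = true
        · rw [if_pos h3, if_pos h3]; rfl
        · rw [if_neg h3, if_neg h3]
          by_cases h4 : PySem.Str.isIn "Air Handler" t = true
          · rw [if_pos h4, if_pos h4]; rfl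
          · rw [if_neg h4, if_neg h4]
            by_cases h5 : PySem.Str.isIn "Rooftop Unit" t = true
            · rw [if_pos h5, if_pos h5]; rfl
            · rw [if_neg h5, if_neg h5]
              by_cases h6 : PySem.Str.isIn "Compressor" t = true
              · rw [if_pos h6, if_pos h6]; rfl
              · rw [if_neg h6, if_neg h6]
                by_cases h7 : PySem.Str.isIn "Motor" t = true
                · rw [if_pos h7, if_pos h7]; rfl
                · rw [if_neg h7, if_neg h7]
                  by_cases h8 : PySem.Str.isIn "Coil" t = true
                  · rw [if_pos h8, if_pos h8]; rfl
                  · rw [if_neg h8, if_neg h8]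
                    by_cases h9 : PySem.Str.isIn "Thermostat" t = true
                    · rw [if_pos h9, if_pos h9]; rfl
                    · rw [if_neg h9, if_neg h9]
                      by_cases h10 : PySem.Str.isIn "Capacitor" t = true
                      · rw [if_pos h10, if_pos h10]; rfl
                      · rw [if_neg h10, if_neg h10]
                        by_cases h11 : PySem.Str.isIn "Gas Valve" t = true
                        · rw [if_pos h11, if_pos h11]; rfl
                        · rw [if_neg h11, if_neg h11]
                          by_cases h12 : PySem.Str.isIn "Control Board" t = true
                          · rw [if_pos h12, if_pos h12]; rfl
                          · rw [if_neg h12, if_neg h12]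
                            by_cases h13 : PySem.Str.isIn "Ignitor" t = true
                            · rw [if_pos h13, if_pos h13]; rfl
                            · rw [if_neg h13, if_neg h13]
                              by_cases h14 : PySem.Str.isIn "Humidifier" t = true
                              · rw [if_pos h14, if_pos h14]; rfl
                              · rw [if_neg h14, if_neg h14]
                                by_cases h15 : PySem.Str.isIn "Air Cleaner" t = true
                                · rw [if_pos h15, if_pos h15]; rfl
                                · rw [if_neg h15, if_neg h15]
                                  by_cases h16 : PySem.Str.isIn "Air Purifier" t = true
                                  · rw [if_pos h16, if_pos h16]; rfl
                                  · rw [if_neg h16, if_neg h16]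
                                    simp

theorem pvFold_eq (ts : List String) (acc : List String) :
    ts.foldl
      (fun acc type =>
        if PySem.Str.isIn "Air Conditioner" type || PySem.Str.isIn "AC" type then acc ++ ["Air Conditioner"]
        else if PySem.Str.isIn "Heat Pump" type then acc ++ ["Heat Pump"]
        else if PySem.Str.isIn "Furnace" type then acc ++ ["Furnace"]
        else if PySem.Str.isIn "Mini-Split" type then acc ++ ["Mini-Split"]
        else if PySem.Str.isIn "Air Handler" type then acc ++ ["Air Handler"]
        else if PySem.Str.isIn "Rooftop Unit" type then acc ++ ["Rooftop Unit"]
        else if PySem.Str.isIn "Compressor" type then acc ++ ["Compressor"]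
        else if PySem.Str.isIn "Motor" type then acc ++ ["Motor"]
        else if PySem.Str.isIn "Coil" type then acc ++ ["Coil"]
        else if PySem.Str.isIn "Thermostat" type then acc ++ ["Thermostat"]
        else if PySem.Str.isIn "Capacitor" type then acc ++ ["Capacitor"]
        else if PySem.Str.isIn "Gas Valve" type then acc ++ ["Gas Valve"]
        else if PySem.Str.isIn "Control Board" type then acc ++ ["Control Board"]
        else if PySem.Str.isIn "Ignitor" type then acc ++ ["Ignitor"]
        else if PySem.Str.isIn "Humidifier" type then acc ++ ["Humidifier"]
        else if PySem.Str.isIn "Air Cleaner" type then acc ++ ["Air Cleaner"]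
        else if PySem.Str.isIn "Air Purifier" type then acc ++ ["Air Purifier"]
        else acc)
      acc
    = acc ++ ts.filterMap pvClassify := by
  induction ts generalizing acc with
  | nil => simp
  | cons t ts ih =>
    rw [List.foldl_cons, List.filterMap_cons, pvStep_eq]
    cases h : pvClassify t with
    | none => simpa using ih acc
    | some v =>
      rw [show (some v : Option String).toList = [v] from rfl, ih (acc ++ [v])]
      simp

-- B's staged fold, flattened to per-token first-match classification
theorem pvAlt_eq (category : String) :
    Category_Parser_alt category
    = ((PySem.Str.split? (PySem.Str.replace (PySem.Str.replace category " + " ",") " - " ",") ",").getD []).filterMap pvClassify := by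
  unfold Category_Parser_alt
  set toks := (PySem.Str.split? (PySem.Str.replace (PySem.Str.replace category " + " ",") " - " ",") ",").getD [] with htoks
  show (pvCatTable.foldl (fun best e => pvStage e.1 e.2 best toks) ((toks.map (fun _ => none)))).filterMap id
      = toks.filterMap pvClassify
  rw [pvFoldStage pvCatTable toks _ (by simp)]
  rw [pv_zip_map_const (pvTok pvCatTable) toks]
  rw [List.filterMap_map]
  apply List.filterMap_congr
  intro t _
  simp only [Function.comp, id, pvTok, pvClassify,
    pv_foldl_first (fun e : List String × String => e.1.any (fun p => PySem.Str.isIn p t))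
      (fun e : List String × String => e.2)]

-- ===== VERDICT (by name: the statement is the Claim_ definition above) =====
theorem Category_Parser_spec : Claim_equal_Category_Parser := by
  intro category _
  unfold Spec_Category_Parser Category_Parser
  rw [pvAlt_eq, pvFold_eq, List.nil_append]
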